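-- pv_equiv track=rewrite | github.com/joshuamumbere/MY-OVERALL-PRACTICE | PRACTICE/python practice/vybe.py | uppersplit
-- ===== SOURCE A (Python) =====
-- def uppersplit(data):
--     buff=''
--     for item in data:
--         if item.isupper():
--             yield buff
--             buff=''
--         buff+=item
--     yield buff
-- ===== SOURCE B (Python) =====
-- def uppersplit(data):
--     bounds = [0] + [i for i, c in enumerate(data) if c.isupper()] + [len(data)]
--     for a, b in zip(bounds, bounds[1:]):
--         yield data[a:b]
-- ===== Notes on version B (the rewrite author's own statement) =====
-- stated objective: alternative
-- what changed: Replaces the running-buffer accumulation with a two-phase index scan: first collect the boundary positions (0, each uppercase index, len), then yield the slices between consecutive boundaries.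
import Mathlib
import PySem

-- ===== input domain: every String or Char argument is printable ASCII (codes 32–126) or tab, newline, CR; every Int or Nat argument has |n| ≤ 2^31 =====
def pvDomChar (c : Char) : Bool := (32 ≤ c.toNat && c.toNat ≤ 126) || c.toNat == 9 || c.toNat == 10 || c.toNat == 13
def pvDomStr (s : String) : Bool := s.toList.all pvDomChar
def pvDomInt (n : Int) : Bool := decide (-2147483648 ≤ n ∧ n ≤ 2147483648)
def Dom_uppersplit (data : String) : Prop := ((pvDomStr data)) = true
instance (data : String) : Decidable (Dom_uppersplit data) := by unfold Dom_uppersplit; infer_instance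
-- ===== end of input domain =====

-- B replaces A's running-buffer accumulation with a two-phase boundary-index scan; objective: alternative (same cost).
-- Both are generators in Python; the ports return the list of all yielded strings.

-- ===== PORT A =====
-- the generator's yields collected in order; buff is the running buffer (string as list of code points)
def uppersplitAuxA : List Char → List Char → List (List Char)
  | [], buff => [buff]
  | c :: rest, buff =>
    if PySem.Chars.isupper c then buff :: uppersplitAuxA rest ([] ++ [c])
    else uppersplitAuxA rest (buff ++ [c])

def uppersplit (data : String) : List String :=
  (uppersplitAuxA data.toList []).map String.ofList

-- ===== PORT B =====
def uppersplit_alt (data : String) : List String :=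
  let cs := data.toList
  let ups : List Int := (PySem.List.enumerate cs 0).filterMap
    (fun p => if PySem.Chars.isupper p.2 then some p.1 else none)
  let bounds : List Int := 0 :: ups ++ [(cs.length : Int)]
  (bounds.zip bounds.tail).map
    (fun p => String.ofList (PySem.List.slice cs (some p.1) (some p.2)))

-- ===== PRECONDITION & SPEC =====
def Spec_uppersplit (data : String) (out : List String) : Prop := out = uppersplit_alt data
instance (data : String) (out : List String) : Decidable (Spec_uppersplit data out) := by unfold Spec_uppersplit; infer_instance

-- ===== CLAIM (what is proved, stated in full; the proofs are below) =====
def Claim_equal_uppersplit : Prop := ∀ (data : String), Dom_uppersplit data → Spec_uppersplit data (uppersplit data)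

-- ===== LEMMAS AND PROOFS =====

-- common segmentation spec
def consHead (c : Char) : List (List Char) → List (List Char)
  | [] => [[c]]
  | h :: t => (c :: h) :: t

def mapHead (f : List Char → List Char) : List (List Char) → List (List Char)
  | [] => []
  | h :: t => f h :: t

def S : List Char → List (List Char)
  | [] => [[]]
  | c :: cs => if PySem.Chars.isupper c then [] :: consHead c (S cs) else consHead c (S cs)

theorem S_ne_nil (cs : List Char) : S cs ≠ [] := by
  cases cs with
  | nil => simp [S]
  | cons c cs =>
    simp only [S]
    split <;> cases h : S cs <;> simp [consHead]

-- A equals the spec segmentation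
theorem auxA_eq (cs : List Char) : ∀ buff, uppersplitAuxA cs buff = mapHead (buff ++ ·) (S cs) := by
  induction cs with
  | nil => intro buff; simp [uppersplitAuxA, S, mapHead]
  | cons c cs ih =>
    intro buff
    obtain ⟨h, t, hS⟩ : ∃ h t, S cs = h :: t := by
      cases hS : S cs with
      | nil => exact absurd hS (S_ne_nil cs)
      | cons h t => exact ⟨h, t, rfl⟩
    simp only [uppersplitAuxA, S]
    split
    · rw [ih, hS]; simp [mapHead, consHead]
    · rw [ih, hS]; simp [mapHead, consHead]

-- B-side: uppercase positions as Nats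
def upIdx : List Char → List Nat
  | [] => []
  | c :: cs =>
    if PySem.Chars.isupper c then 0 :: (upIdx cs).map (· + 1)
    else (upIdx cs).map (· + 1)

theorem ups_enum (cs : List Char) : ∀ s : Int,
    (PySem.List.enumerate cs s).filterMap
      (fun p => if PySem.Chars.isupper p.2 then some p.1 else none)
    = (upIdx cs).map (fun k : Nat => s + (k : Int)) := by
  induction cs with
  | nil => intro s; simp [PySem.List.enumerate_nil, upIdx]
  | cons c cs ih =>
    intro s
    by_cases hc : PySem.Chars.isupper c = true
    · simp only [PySem.List.enumerate_cons, List.filterMap_cons, upIdx, hc, if_true]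
      rw [ih (s + 1)]
      simp only [List.map_cons, List.map_map, List.cons.injEq]
      refine ⟨by simp, ?_⟩
      apply List.map_congr_left; intro k _; simp only [Function.comp_apply]; push_cast; ring
    · simp only [PySem.List.enumerate_cons, List.filterMap_cons, upIdx, hc, Bool.false_eq_true,
        if_false]
      rw [ih (s + 1)]
      simp only [List.map_map]
      apply List.map_congr_left; intro k _; simp only [Function.comp_apply]; push_cast; ring

-- segments from Nat boundaries
def pairsSeg (cs : List Char) (bounds : List Nat) : List (List Char) :=
  (bounds.zip bounds.tail).map (fun p => (cs.drop p.1).take (p.2 - p.1))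

theorem pairsSeg_peel (cs : List Char) (a b : Nat) (L : List Nat) :
    pairsSeg cs (a :: b :: L) = ((cs.drop a).take (b - a)) :: pairsSeg cs (b :: L) := by
  simp [pairsSeg]

theorem pairsSeg_shift (cs : List Char) (c : Char) (b0 : Nat) (rest : List Nat) :
    pairsSeg (c :: cs) (0 :: (b0 :: rest).map (· + 1)) = consHead c (pairsSeg cs (0 :: b0 :: rest)) := by
  have hzip : (((b0 + 1) :: rest.map (· + 1)).zip (rest.map (· + 1)))
      = ((b0 :: rest).zip rest).map (Prod.map (· + 1) (· + 1)) := by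
    rw [show ((b0 + 1) :: rest.map (· + 1)) = (b0 :: rest).map (· + 1) by simp, List.zip_map]
  simp only [pairsSeg, List.map_cons, List.zip_cons_cons, List.tail_cons, hzip, consHead,
    List.cons.injEq]
  refine ⟨by simp, ?_⟩
  rw [List.map_map]
  apply List.map_congr_left
  intro p _
  simp [Prod.map, Nat.add_sub_add_right]

def segsN (cs : List Char) : List (List Char) :=
  pairsSeg cs (0 :: (upIdx cs ++ [cs.length]))

theorem segsN_eq_S (cs : List Char) : segsN cs = S cs := by
  induction cs with
  | nil => simp [segsN, pairsSeg, upIdx, S]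
  | cons c cs ih =>
    obtain ⟨hd, tl, h⟩ : ∃ hd tl, upIdx cs ++ [cs.length] = hd :: tl := by
      cases hu : upIdx cs with
      | nil => exact ⟨cs.length, [], by simp⟩
      | cons a t => exact ⟨a, t ++ [cs.length], by simp⟩
    have key : pairsSeg (c :: cs) (0 :: (upIdx cs ++ [cs.length]).map (· + 1)) = consHead c (S cs) := by
      rw [h, pairsSeg_shift, ← h]
      show consHead c (segsN cs) = _
      rw [ih]
    simp only [segsN, upIdx, S, List.length_cons]
    split
    · rw [show (0 :: (upIdx cs).map (· + 1)) ++ [cs.length + 1]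
          = 0 :: (upIdx cs ++ [cs.length]).map (· + 1) by simp]
      rw [show (0 : Nat) :: 0 :: (upIdx cs ++ [cs.length]).map (· + 1)
          = (0 : Nat) :: (0 :: (upIdx cs ++ [cs.length]).map (· + 1)) from rfl]
      rw [pairsSeg_peel, key]
      simp
    · rw [show (upIdx cs).map (· + 1) ++ [cs.length + 1]
          = (upIdx cs ++ [cs.length]).map (· + 1) by simp]
      exact key

-- casting the boundary list from Int back to Nat
theorem castSeg (cs : List Char) (bs : List Nat) :
    ((bs.map (fun k : Nat => (k : Int))).zip (bs.map (fun k : Nat => (k : Int))).tail).map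
      (fun p => String.ofList (PySem.List.slice cs (some p.1) (some p.2)))
    = (pairsSeg cs bs).map String.ofList := by
  rw [← List.map_tail, List.zip_map]
  unfold pairsSeg
  rw [List.map_map, List.map_map]
  apply List.map_congr_left
  intro p _
  simp [Prod.map, PySem.List.slice_natCast]

-- bridge: port B computes segsN
theorem alt_eq (data : String) : uppersplit_alt data = (segsN data.toList).map String.ofList := by
  show (((0 : Int) :: ((PySem.List.enumerate data.toList 0).filterMap
      (fun p => if PySem.Chars.isupper p.2 then some p.1 else none) ++ [(data.toList.length : Int)])).zip
      ((0 : Int) :: ((PySem.List.enumerate data.toList 0).filterMap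
      (fun p => if PySem.Chars.isupper p.2 then some p.1 else none) ++ [(data.toList.length : Int)])).tail).map
      (fun p => String.ofList (PySem.List.slice data.toList (some p.1) (some p.2)))
    = (segsN data.toList).map String.ofList
  rw [ups_enum data.toList 0]
  have hcast : ((0 : Int) :: ((upIdx data.toList).map (fun k : Nat => (0 : Int) + (k : Int)) ++ [(data.toList.length : Int)]))
      = (0 :: (upIdx data.toList ++ [data.toList.length])).map (fun k : Nat => (k : Int)) := by
    simp
  rw [hcast, castSeg]
  rw [segsN]

-- ===== VERDICT (by name: the statement is the Claim_ definition above) =====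
theorem uppersplit_spec : Claim_equal_uppersplit := by
  intro data _
  unfold Spec_uppersplit uppersplit
  rw [alt_eq, auxA_eq, segsN_eq_S]
  cases h : S data.toList with
  | nil => exact absurd h (S_ne_nil data.toList)
  | cons hd tl => simp [mapHead]
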